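-- pv_equiv track=rewrite | github.com/Schromeo/CodingStepByStep | InterviewPreparation/Google/minimum_delete.py | solve_optimal
-- ===== SOURCE A (Python) =====
-- def solve_optimal(list1: list, list2: list, K: int) -> list:
--     """
--     使用哈希集合和一次遍历，以 O(N+K) 的时间复杂度解决问题。
--     N = len(list2)
--     K = K (或 len(list1))
--     """
--
--     # 1. 建立“违禁”名单 (哈希集合)，O(K)
--     #    我们只关心 list1 的前 K 个元素
--     forbidden_set = set(list1[:K])
--
--     # 2. 初始化两个“篮子”
--     safe_prefix = []
--     rest_of_list = []
--
--     # 3. 遍历 list2 一次，O(N)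
--     for x in list2:
--
--         # 情况一：我们的 "安全区" 还没满
--         if len(safe_prefix) < K:
--
--             # 检查 x 是否被禁止 (O(1) 查询)
--             if x not in forbidden_set:
--                 # 不在！它是安全的，加入 "安全区"
--                 safe_prefix.append(x)
--             else:
--                 # 在！它被 "删除" (即，我们跳过它)
--                 pass
--
--         # 情况二：我们的 "安全区" 已经满了
--         else:
--             # 我们的任务已经完成。
--             # 剩下的所有元素都无条件保留，以满足“最少删除”
--             rest_of_list.append(x)
--
--     # 4. 拼接并返回结果，O(N)
--     return safe_prefix + rest_of_list
-- ===== SOURCE B (Python) =====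
-- def solve_optimal(list1: list, list2: list, K: int) -> list:
--     forbidden = set(list1[:K])
--     # Pass 1: find the split point: the first index after K safe elements have appeared.
--     need = K
--     split = len(list2)
--     for j, x in enumerate(list2):
--         if need <= 0:
--             split = j
--             break
--         if x not in forbidden:
--             need -= 1
--     # Pass 2: filter the prefix once, keep the suffix by slicing.
--     return [x for x in list2[:split] if x not in forbidden] + list2[split:]
-- ===== Notes on version B (the rewrite author's own statement) =====
-- stated objective: alternative
-- what changed: Replaces the two-basket accumulation over the whole list with a split-point search (count down K safe elements, break) followed by one filter of the prefix and a slice of the suffix.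
import Mathlib
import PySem

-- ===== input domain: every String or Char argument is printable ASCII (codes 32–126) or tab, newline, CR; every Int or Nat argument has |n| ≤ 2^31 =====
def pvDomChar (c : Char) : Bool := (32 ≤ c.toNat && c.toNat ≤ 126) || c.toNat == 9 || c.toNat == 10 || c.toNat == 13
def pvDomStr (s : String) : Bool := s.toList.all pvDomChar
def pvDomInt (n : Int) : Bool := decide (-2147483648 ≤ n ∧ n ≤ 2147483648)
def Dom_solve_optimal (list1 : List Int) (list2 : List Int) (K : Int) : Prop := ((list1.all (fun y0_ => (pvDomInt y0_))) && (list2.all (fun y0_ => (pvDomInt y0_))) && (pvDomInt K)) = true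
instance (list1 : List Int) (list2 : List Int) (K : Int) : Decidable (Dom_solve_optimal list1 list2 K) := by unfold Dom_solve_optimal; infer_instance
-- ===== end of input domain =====

-- B replaces A's two-basket single pass by a split-point search plus a prefix filter and a suffix slice (alternative decomposition, same cost).
-- ===== PORT A =====
def solve_optimal (list1 : List Int) (list2 : List Int) (K : Int) : List Int :=
  let forbidden_set := PySem.Set.ofList (PySem.List.slice list1 none (some K))
  let p := list2.foldl (fun (sr : List Int × List Int) x =>
    if (sr.1.length : Int) < K then
      if !forbidden_set.contains x then (sr.1 ++ [x], sr.2) else sr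
    else (sr.1, sr.2 ++ [x])) ([], [])
  p.1 ++ p.2

-- ===== PORT B =====
-- Source B's first loop (enumerate with break); j is the running index, the no-break exit returns len(list2).
def pvFindSplit (forb : PySem.Set Int) (need : Int) (xs : List Int) (j : Nat) : Nat :=
  match xs with
  | [] => j
  | x :: t =>
      if need ≤ 0 then j
      else pvFindSplit forb (if forb.contains x then need else need - 1) t (j + 1)

-- list2[:split] / list2[split:] with split a Nat ≤ len(list2) are exactly take/drop.
def solve_optimal_alt (list1 : List Int) (list2 : List Int) (K : Int) : List Int :=
  let forbidden := PySem.Set.ofList (PySem.List.slice list1 none (some K))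
  let split := pvFindSplit forbidden K list2 0
  (list2.take split).filter (fun x => !forbidden.contains x) ++ list2.drop split

-- ===== PRECONDITION & SPEC =====
def Spec_solve_optimal (list1 : List Int) (list2 : List Int) (K : Int) (out : List Int) : Prop := out = solve_optimal_alt list1 list2 K
instance (list1 : List Int) (list2 : List Int) (K : Int) (out : List Int) : Decidable (Spec_solve_optimal list1 list2 K out) := by unfold Spec_solve_optimal; infer_instance

-- ===== CLAIM (what is proved, stated in full; the proofs are below) =====
def Claim_equal_solve_optimal : Prop := ∀ (list1 : List Int) (list2 : List Int) (K : Int), Dom_solve_optimal list1 list2 K → Spec_solve_optimal list1 list2 K (solve_optimal list1 list2 K)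

-- ===== LEMMAS AND PROOFS =====

lemma pvFindSplit_shift (forb : PySem.Set Int) (xs : List Int) :
    ∀ (need : Int) (j : Nat), pvFindSplit forb need xs j = j + pvFindSplit forb need xs 0 := by
  induction xs with
  | nil => intro need j; simp [pvFindSplit]
  | cons x t ih =>
      intro need j
      by_cases h : need ≤ 0
      · simp [pvFindSplit, h]
      · simp only [pvFindSplit, if_neg h]
        rw [ih _ (j+1), ih _ 1]; omega

lemma foldl_full (K : Int) (forb : PySem.Set Int) (t : List Int) :
    ∀ (s r : List Int), ¬ ((s.length : Int) < K) →
    t.foldl (fun (sr : List Int × List Int) x =>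
      if (sr.1.length : Int) < K then
        if !forb.contains x then (sr.1 ++ [x], sr.2) else sr
      else (sr.1, sr.2 ++ [x])) (s, r) = (s, r ++ t) := by
  induction t with
  | nil => intro s r h; simp
  | cons x u ih =>
      intro s r h
      simp only [List.foldl_cons, if_neg h]
      rw [ih s (r ++ [x]) h]; simp

lemma foldl_char (K : Int) (forb : PySem.Set Int) (t : List Int) :
    ∀ (s r : List Int),
    (t.foldl (fun (sr : List Int × List Int) x =>
      if (sr.1.length : Int) < K then
        if !forb.contains x then (sr.1 ++ [x], sr.2) else sr
      else (sr.1, sr.2 ++ [x])) (s, r)).1 ++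
    (t.foldl (fun (sr : List Int × List Int) x =>
      if (sr.1.length : Int) < K then
        if !forb.contains x then (sr.1 ++ [x], sr.2) else sr
      else (sr.1, sr.2 ++ [x])) (s, r)).2 =
    s ++ (t.take (pvFindSplit forb (K - s.length) t 0)).filter (fun x => !forb.contains x)
      ++ r ++ t.drop (pvFindSplit forb (K - s.length) t 0) := by
  induction t with
  | nil => intro s r; simp [pvFindSplit]
  | cons x u ih =>
      intro s r
      by_cases h : (s.length : Int) < K
      · have hne : ¬ (K - (s.length : Int) ≤ 0) := by omega
        simp only [pvFindSplit, if_neg hne]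
        by_cases hc : forb.contains x
        · simp only [List.foldl_cons, if_pos h, hc, Bool.not_true, Bool.false_eq_true,
            if_false, if_true]
          rw [ih s r, pvFindSplit_shift forb u _ 1,
            Nat.add_comm 1 (pvFindSplit forb (K - (s.length : Int)) u 0)]
          have hc' : decide (x ∈ forb) = true := by simpa [PySem.Set.contains] using hc
          simp [hc', List.take_succ_cons, List.drop_succ_cons]
        · simp only [List.foldl_cons, if_pos h, hc, Bool.not_false, Bool.false_eq_true,
            if_false, if_true]
          rw [ih (s ++ [x]) r]
          have hlen : (K - ((s ++ [x]).length : Int)) = K - (s.length : Int) - 1 := by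
            simp; omega
          rw [hlen, pvFindSplit_shift forb u _ 1,
            Nat.add_comm 1 (pvFindSplit forb (K - (s.length : Int) - 1) u 0)]
          have hc' : decide (x ∈ forb) = false := by simpa [PySem.Set.contains] using hc
          simp [hc', List.take_succ_cons, List.drop_succ_cons]
      · have hle : K - (s.length : Int) ≤ 0 := by omega
        simp only [pvFindSplit, if_pos hle]
        simp only [List.foldl_cons, if_neg h]
        rw [foldl_full K forb u s (r ++ [x]) h]
        simp

-- ===== VERDICT (by name: the statement is the Claim_ definition above) =====
theorem solve_optimal_spec : Claim_equal_solve_optimal := by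
  intro list1 list2 K _
  unfold Spec_solve_optimal solve_optimal solve_optimal_alt
  have h := foldl_char K (PySem.Set.ofList (PySem.List.slice list1 none (some K))) list2 [] []
  simp only [List.nil_append, List.append_nil] at h
  simp only [h]
  norm_num
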